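-- pv_equiv track=rewrite | github.com/potatomasqer/python-game-projects | minesweeper.py | searchX
-- ===== SOURCE A (Python) =====
-- def searchX(tobesearched,x):
--     marked = []
--     for i in range(len(tobesearched)):
--         if tobesearched[i][0] == x: #look through all of tobesearched and mark every thing that could crash
--             marked += [tobesearched[i]]
--     for a in marked:
--         tobesearched.remove(a)
--     return tobesearched
-- ===== SOURCE B (Python) =====
-- def searchX(tobesearched, x):
--     # single reverse in-place pass: delete by index, no match list
--     for i in range(len(tobesearched) - 1, -1, -1):
--         if tobesearched[i][0] == x:
--             del tobesearched[i]
--     return tobesearched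
-- ===== Notes on version B (the rewrite author's own statement) =====
-- stated objective: simpler
-- what changed: Replaced the two-phase collect-matches-then-remove-by-value strategy with a single reverse index pass that deletes matching rows in place with del.
import Mathlib
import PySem

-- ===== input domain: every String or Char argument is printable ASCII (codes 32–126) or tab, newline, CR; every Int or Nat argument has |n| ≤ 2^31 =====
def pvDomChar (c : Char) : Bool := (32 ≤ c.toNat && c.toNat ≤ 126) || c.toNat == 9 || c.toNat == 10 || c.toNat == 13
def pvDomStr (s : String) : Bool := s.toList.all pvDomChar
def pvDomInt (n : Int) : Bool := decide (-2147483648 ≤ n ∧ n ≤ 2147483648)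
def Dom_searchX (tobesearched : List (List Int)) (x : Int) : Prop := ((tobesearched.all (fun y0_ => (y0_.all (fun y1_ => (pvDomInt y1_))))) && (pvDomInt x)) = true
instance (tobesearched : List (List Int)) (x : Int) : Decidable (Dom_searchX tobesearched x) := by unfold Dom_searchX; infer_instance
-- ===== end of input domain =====

-- B replaces A's collect-matches-then-remove-by-value two-phase strategy by a single
-- reverse index pass deleting matching rows in place (same asymptotic cost; simpler).
-- Both A and B mutate the passed-in list in place in Python; the equivalence proved
-- here is about the return value.


-- ===== PORT A =====
-- tobesearched[i][0] == x is ported as 'pyGet? row 0 = some x' (exact: under Pre_ every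
-- row is nonempty so Python never raises); tobesearched[i] uses pyGetD (index always in
-- range); list.remove(a) is remove? with getD (exact: a was collected from the list).
def searchX (tobesearched : List (List Int)) (x : Int) : List (List Int) :=
  let marked :=
    (PySem.List.pyRange 0 (PySem.List.len tobesearched) 1).foldl
      (fun m i =>
        if PySem.List.pyGet? (PySem.List.pyGetD tobesearched i []) 0 = some x then
          m ++ [PySem.List.pyGetD tobesearched i []]
        else m) []
  marked.foldl (fun l a => (PySem.List.remove? l a).getD l) tobesearched

-- ===== PORT B =====
-- reverse pass i = len-1 .. 0; 'del l[i]' is eraseIdx i.toNat (exact: 0 ≤ i < len l).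
def searchX_alt (tobesearched : List (List Int)) (x : Int) : List (List Int) :=
  (PySem.List.pyRange (PySem.List.len tobesearched - 1) (-1) (-1)).foldl
    (fun l i =>
      if PySem.List.pyGet? (PySem.List.pyGetD l i []) 0 = some x then l.eraseIdx i.toNat
      else l) tobesearched

-- ===== PRECONDITION & SPEC =====
-- Pre_ excludes lists containing an empty row: there Python's tobesearched[i][0]
-- raises IndexError (in A and in B alike).
def Pre_searchX (tobesearched : List (List Int)) (x : Int) : Prop :=
  ∀ r ∈ tobesearched, r ≠ []
instance (tobesearched : List (List Int)) (x : Int) : Decidable (Pre_searchX tobesearched x) := by unfold Pre_searchX; infer_instance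
def pvWitness_searchX : List (List Int) × Int := ([[1, 2], [3], [1]], 1)
def Spec_searchX (tobesearched : List (List Int)) (x : Int) (out : List (List Int)) : Prop := out = searchX_alt tobesearched x
instance (tobesearched : List (List Int)) (x : Int) (out : List (List Int)) : Decidable (Spec_searchX tobesearched x out) := by unfold Spec_searchX; infer_instance

-- ===== CLAIM (what is proved, stated in full; the proofs are below) =====
def Claim_equal_searchX : Prop := ∀ (tobesearched : List (List Int)) (x : Int), Dom_searchX tobesearched x → Pre_searchX tobesearched x → Spec_searchX tobesearched x (searchX tobesearched x)

-- ===== LEMMAS AND PROOFS =====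

theorem removeFold_skip (step : List (List Int) → List Int → List (List Int))
    (hstep : step = fun l a => (PySem.List.remove? l a).getD l)
    (ms : List (List Int)) (r : List Int) (hr : ∀ a ∈ ms, a ≠ r) :
    ∀ s, ms.foldl step (r :: s) = r :: ms.foldl step s := by
  induction ms with
  | nil => intro s; simp
  | cons a t ih =>
    intro s
    have hne : r ≠ a := fun h => (hr a (by simp)) h.symm
    have h1 : step (r :: s) a = r :: step s a := by
      subst hstep
      simp only
      rw [PySem.List.remove?_cons_of_ne s hne]
      cases PySem.List.remove? s a <;> simp
    rw [List.foldl_cons, h1, List.foldl_cons]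
    exact ih (fun b hb => hr b (by simp [hb])) (step s a)

theorem removeFold_filter (p : List Int → Bool)
    (step : List (List Int) → List Int → List (List Int))
    (hstep : step = fun l a => (PySem.List.remove? l a).getD l) :
    ∀ l : List (List Int), (l.filter p).foldl step l = l.filter (fun r => !p r) := by
  intro l
  induction l with
  | nil => simp
  | cons r t ih =>
    by_cases hp : p r
    · have h1 : step (r :: t) r = t := by subst hstep; simp
      simp only [List.filter_cons, hp, if_pos, List.foldl_cons, h1,
        Bool.not_true, Bool.false_eq_true, if_false]
      simpa [hp] using ih
    · have hne : ∀ a ∈ t.filter p, a ≠ r := by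
        intro a ha h; subst h
        exact hp (List.of_mem_filter ha)
      simp only [List.filter_cons, hp, Bool.not_false, if_true,
        Bool.false_eq_true, if_false]
      rw [removeFold_skip step hstep _ r hne t, ih]

theorem searchX_eq_filter (tobesearched : List (List Int)) (x : Int) :
    searchX tobesearched x
      = tobesearched.filter
          (fun r => !decide (PySem.List.pyGet? r 0 = some x)) := by
  unfold searchX
  rw [PySem.List.foldl_pyRange_zero_pyGetD tobesearched []
    (fun m r => if PySem.List.pyGet? r 0 = some x then m ++ [r] else m) []]
  rw [PySem.List.foldl_append_ite_eq_filter]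
  simp only [List.nil_append]
  exact removeFold_filter _ _ rfl tobesearched

theorem delFold_skip (x : Int)
    (step : List (List Int) → Int → List (List Int))
    (hstep : step = fun l i =>
      if PySem.List.pyGet? (PySem.List.pyGetD l i []) 0 = some x then l.eraseIdx i.toNat
      else l)
    (is : List Int) (his : ∀ i ∈ is, 1 ≤ i) (r : List Int) :
    ∀ t, is.foldl step (r :: t) = r :: (is.map (· - 1)).foldl step t := by
  induction is with
  | nil => intro t; simp
  | cons i js ih =>
    intro t
    have hi : 1 ≤ i := his i (by simp)
    have hget : PySem.List.pyGetD (r :: t) i ([] : List Int)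
        = PySem.List.pyGetD t (i - 1) ([] : List Int) := by
      have h0 : (0:Int) ≤ i - 1 := by omega
      obtain ⟨k, hk⟩ : ∃ k : ℕ, i - 1 = (k : Int) := ⟨(i-1).toNat, by omega⟩
      have : i = ((k + 1 : ℕ) : Int) := by push_cast; omega
      rw [this]
      have h2 : ((k + 1 : ℕ) : Int) - 1 = ((k : ℕ) : Int) := by push_cast; omega
      rw [h2, PySem.List.pyGetD_natCast, PySem.List.pyGetD_natCast]
      simp [List.getD]
    have hstep1 : step (r :: t) i = r :: step t (i - 1) := by
      subst hstep
      simp only [hget]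
      by_cases hc : PySem.List.pyGet? (PySem.List.pyGetD t (i-1) ([] : List Int)) 0 = some x
      · simp only [hc, if_pos]
        have : i.toNat = (i - 1).toNat + 1 := by omega
        rw [this, List.eraseIdx_cons_succ]
      · simp [hc]
    rw [List.foldl_cons, hstep1, List.map_cons, List.foldl_cons]
    exact ih (fun j hj => his j (by simp [hj])) (step t (i - 1))

theorem searchX_alt_eq_filter (x : Int) :
    ∀ (tobesearched : List (List Int)),
    searchX_alt tobesearched x
      = tobesearched.filter
          (fun r => !decide (PySem.List.pyGet? r 0 = some x)) := by
  intro l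
  induction l with
  | nil =>
    unfold searchX_alt
    rw [PySem.List.pyRange_neg_one_eq_nil (by simp)]
    simp
  | cons r t ih =>
    unfold searchX_alt
    have hlen : PySem.List.len (r :: t) - 1 = (t.length : Int) := by
      simp [PySem.List.len_eq]
    rw [hlen, PySem.List.pyRange_neg_one_eq_reverse]
    have hz : (-1 : Int) + 1 = 0 := by norm_num
    rw [hz]
    have hsplit : PySem.List.pyRange 0 ((t.length : Int) + 1) 1
        = 0 :: PySem.List.pyRange 1 ((t.length : Int) + 1) 1 := by
      have := PySem.List.pyRange_one_cons (a := 0) (b := (t.length : Int) + 1)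
        (by positivity)
      simpa using this
    rw [hsplit]
    simp only [List.reverse_cons, List.foldl_append, List.foldl_cons, List.foldl_nil]
    have hpos : ∀ i ∈ (PySem.List.pyRange 1 ((t.length : Int) + 1) 1).reverse, 1 ≤ i := by
      intro i hi
      rw [List.mem_reverse, PySem.List.mem_pyRange_one] at hi
      omega
    rw [delFold_skip x _ rfl _ hpos r t]
    have hmap : (PySem.List.pyRange 1 ((t.length : Int) + 1) 1).reverse.map (· - 1)
        = (PySem.List.pyRange 0 (t.length : Int) 1).reverse := by
      rw [List.map_reverse]
      congr 1
      rw [PySem.List.pyRange_one, PySem.List.pyRange_one]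
      simp only [List.map_map]
      have hn : ((t.length : Int) + 1 - 1).toNat = ((t.length : Int) - 0).toNat := by omega
      rw [hn]
      apply List.map_congr_left
      intro k _
      simp only [Function.comp_apply]
      omega
    rw [hmap]
    have hb : (PySem.List.pyRange 0 (t.length : Int) 1).reverse
        = PySem.List.pyRange ((t.length : Int) - 1) (-1) (-1) := by
      rw [PySem.List.pyRange_neg_one_eq_reverse]
      norm_num
    rw [hb]
    have halt : (PySem.List.pyRange ((t.length : Int) - 1) (-1) (-1)).foldl
        (fun l i =>
          if PySem.List.pyGet? (PySem.List.pyGetD l i []) 0 = some x then l.eraseIdx i.toNat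
          else l) t = searchX_alt t x := by
      unfold searchX_alt
      simp [PySem.List.len_eq]
    rw [halt, ih]
    by_cases hr : PySem.List.pyGet? r 0 = some x
    · simp [hr, PySem.List.pyGetD_zero_cons]
    · simp [hr, PySem.List.pyGetD_zero_cons]

-- ===== VERDICT (by name: the statement is the Claim_ definition above) =====
theorem searchX_spec : Claim_equal_searchX := by
  intro tobesearched x _ _
  unfold Spec_searchX
  rw [searchX_eq_filter, searchX_alt_eq_filter]
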